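-- pv_equiv track=rewrite | github.com/dmboynton56/sports-edge | scripts/populate_existing_book_odds.py | _canonical_team
-- ===== SOURCE A (Python) =====
-- from typing import Dict, Optional
--
-- NFL_TEAM_ALIASES: Dict[str, list[str]] = {
--     "ARI": ["arizona cardinals"],
--     "ATL": ["atlanta falcons"],
--     "BAL": ["baltimore ravens"],
--     "BUF": ["buffalo bills"],
--     "CAR": ["carolina panthers"],
--     "CHI": ["chicago bears"],
--     "CIN": ["cincinnati bengals"],
--     "CLE": ["cleveland browns"],
--     "DAL": ["dallas cowboys"],
--     "DEN": ["denver broncos"],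
--     "DET": ["detroit lions"],
--     "GB": ["green bay packers", "green bay"],
--     "HOU": ["houston texans"],
--     "IND": ["indianapolis colts"],
--     "JAX": ["jacksonville jaguars"],
--     "KC": ["kansas city chiefs", "kansas city"],
--     "LAC": ["los angeles chargers", "la chargers"],
--     "LAR": ["los angeles rams", "la rams"],
--     # Some data sources store just "LA" without specifying Rams/Chargers; handle both.
--     "LA": ["los angeles rams", "los angeles chargers", "la rams", "la chargers"],
--     "LV": ["las vegas raiders", "oakland raiders", "raiders"],
--     "MIA": ["miami dolphins"],
--     "MIN": ["minnesota vikings"],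
--     "NE": ["new england patriots", "new england"],
--     "NO": ["new orleans saints"],
--     "NYG": ["new york giants", "ny giants"],
--     "NYJ": ["new york jets", "ny jets"],
--     "PHI": ["philadelphia eagles"],
--     "PIT": ["pittsburgh steelers"],
--     "SEA": ["seattle seahawks"],
--     "SF": ["san francisco 49ers", "san francisco"],
--     "TB": ["tampa bay buccaneers", "tampa bay", "buccaneers"],
--     "TEN": ["tennessee titans"],
--     "WAS": ["washington commanders", "washington"],
-- }
--
-- def _canonical_team(code_or_name: str, league: str) -> Optional[str]:
--     """Map Odds API team name or code to our canonical code (NFL only for now)."""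
--     if not isinstance(code_or_name, str):
--         return None
--     token = code_or_name.strip().lower().replace(" ", "").replace(".", "").replace("-", "")
--     # Direct code match
--     for code in NFL_TEAM_ALIASES:
--         if token == code.lower():
--             return code
--     # Alias match
--     for code, aliases in NFL_TEAM_ALIASES.items():
--         for alias in aliases:
--             alias_token = alias.replace(" ", "").replace(".", "").replace("-", "")
--             if token == alias_token:
--                 return code
--     return None
-- ===== SOURCE B (Python) =====
-- from typing import Dict, Optional
--
-- # One flat, precomputed lookup table: normalized token -> canonical NFL code.
-- # Codes come first; alias tokens follow with first-occurrence precedence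
-- # (so e.g. "losangelesrams" maps to LAR, which appears before LA's alias list).
-- _NFL_LOOKUP: Dict[str, str] = {
--     "ari": "ARI",
--     "atl": "ATL",
--     "bal": "BAL",
--     "buf": "BUF",
--     "car": "CAR",
--     "chi": "CHI",
--     "cin": "CIN",
--     "cle": "CLE",
--     "dal": "DAL",
--     "den": "DEN",
--     "det": "DET",
--     "gb": "GB",
--     "hou": "HOU",
--     "ind": "IND",
--     "jax": "JAX",
--     "kc": "KC",
--     "lac": "LAC",
--     "lar": "LAR",
--     "la": "LA",
--     "lv": "LV",
--     "mia": "MIA",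
--     "min": "MIN",
--     "ne": "NE",
--     "no": "NO",
--     "nyg": "NYG",
--     "nyj": "NYJ",
--     "phi": "PHI",
--     "pit": "PIT",
--     "sea": "SEA",
--     "sf": "SF",
--     "tb": "TB",
--     "ten": "TEN",
--     "was": "WAS",
--     "arizonacardinals": "ARI",
--     "atlantafalcons": "ATL",
--     "baltimoreravens": "BAL",
--     "buffalobills": "BUF",
--     "carolinapanthers": "CAR",
--     "chicagobears": "CHI",
--     "cincinnatibengals": "CIN",
--     "clevelandbrowns": "CLE",
--     "dallascowboys": "DAL",
--     "denverbroncos": "DEN",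
--     "detroitlions": "DET",
--     "greenbaypackers": "GB",
--     "greenbay": "GB",
--     "houstontexans": "HOU",
--     "indianapoliscolts": "IND",
--     "jacksonvillejaguars": "JAX",
--     "kansascitychiefs": "KC",
--     "kansascity": "KC",
--     "losangeleschargers": "LAC",
--     "lachargers": "LAC",
--     "losangelesrams": "LAR",
--     "larams": "LAR",
--     "lasvegasraiders": "LV",
--     "oaklandraiders": "LV",
--     "raiders": "LV",
--     "miamidolphins": "MIA",
--     "minnesotavikings": "MIN",
--     "newenglandpatriots": "NE",
--     "newengland": "NE",
--     "neworleanssaints": "NO",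
--     "newyorkgiants": "NYG",
--     "nygiants": "NYG",
--     "newyorkjets": "NYJ",
--     "nyjets": "NYJ",
--     "philadelphiaeagles": "PHI",
--     "pittsburghsteelers": "PIT",
--     "seattleseahawks": "SEA",
--     "sanfrancisco49ers": "SF",
--     "sanfrancisco": "SF",
--     "tampabaybuccaneers": "TB",
--     "tampabay": "TB",
--     "buccaneers": "TB",
--     "tennesseetitans": "TEN",
--     "washingtoncommanders": "WAS",
--     "washington": "WAS",
-- }
--
-- def _canonical_team(code_or_name: str, league: str) -> Optional[str]:
--     """Map Odds API team name or code to our canonical code (NFL only for now)."""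
--     if not isinstance(code_or_name, str):
--         return None
--     token = code_or_name.strip().lower().replace(" ", "").replace(".", "").replace("-", "")
--     return _NFL_LOOKUP.get(token)
-- ===== Notes on version B (the rewrite author's own statement) =====
-- stated objective: idiomatic
-- what changed: Replaces A's per-call pair of nested in-order scans over the nested alias table with a single precomputed flat dict literal (normalized token -> canonical code, codes first, aliases with first-occurrence precedence), so the lookup is one dict .get.
import Mathlib
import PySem

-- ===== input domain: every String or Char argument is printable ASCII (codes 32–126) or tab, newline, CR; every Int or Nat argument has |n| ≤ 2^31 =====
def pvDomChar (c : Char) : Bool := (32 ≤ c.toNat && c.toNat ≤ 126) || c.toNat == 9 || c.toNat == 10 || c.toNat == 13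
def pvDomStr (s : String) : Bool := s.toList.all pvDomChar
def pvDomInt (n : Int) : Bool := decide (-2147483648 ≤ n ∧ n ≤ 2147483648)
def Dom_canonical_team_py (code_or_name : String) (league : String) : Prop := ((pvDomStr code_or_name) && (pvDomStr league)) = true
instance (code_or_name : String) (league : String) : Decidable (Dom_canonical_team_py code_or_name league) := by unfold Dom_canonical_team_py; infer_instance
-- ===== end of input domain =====

-- B replaces A's two nested in-order scans of the nested alias table by one lookup in a
-- precomputed flat normalized-token -> code dict literal (idiomatic). `league` is unused, as in A.

-- ===== PORT A =====
-- The NFL alias table (A's module constant).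
def pvNflTable : List (String × List String) := [
  ("ARI", ["arizona cardinals"]),
  ("ATL", ["atlanta falcons"]),
  ("BAL", ["baltimore ravens"]),
  ("BUF", ["buffalo bills"]),
  ("CAR", ["carolina panthers"]),
  ("CHI", ["chicago bears"]),
  ("CIN", ["cincinnati bengals"]),
  ("CLE", ["cleveland browns"]),
  ("DAL", ["dallas cowboys"]),
  ("DEN", ["denver broncos"]),
  ("DET", ["detroit lions"]),
  ("GB", ["green bay packers", "green bay"]),
  ("HOU", ["houston texans"]),
  ("IND", ["indianapolis colts"]),
  ("JAX", ["jacksonville jaguars"]),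
  ("KC", ["kansas city chiefs", "kansas city"]),
  ("LAC", ["los angeles chargers", "la chargers"]),
  ("LAR", ["los angeles rams", "la rams"]),
  ("LA", ["los angeles rams", "los angeles chargers", "la rams", "la chargers"]),
  ("LV", ["las vegas raiders", "oakland raiders", "raiders"]),
  ("MIA", ["miami dolphins"]),
  ("MIN", ["minnesota vikings"]),
  ("NE", ["new england patriots", "new england"]),
  ("NO", ["new orleans saints"]),
  ("NYG", ["new york giants", "ny giants"]),
  ("NYJ", ["new york jets", "ny jets"]),
  ("PHI", ["philadelphia eagles"]),
  ("PIT", ["pittsburgh steelers"]),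
  ("SEA", ["seattle seahawks"]),
  ("SF", ["san francisco 49ers", "san francisco"]),
  ("TB", ["tampa bay buccaneers", "tampa bay", "buccaneers"]),
  ("TEN", ["tennessee titans"]),
  ("WAS", ["washington commanders", "washington"])]

-- token = code_or_name.strip().lower().replace(" ", "").replace(".", "").replace("-", "")
def pvNormalize (s : String) : String :=
  PySem.Str.replace (PySem.Str.replace (PySem.Str.replace (PySem.Str.lower (PySem.Str.strip s)) " " "") "." "") "-" ""

-- alias.replace(" ", "").replace(".", "").replace("-", "")
def pvNormAlias (s : String) : String :=
  PySem.Str.replace (PySem.Str.replace (PySem.Str.replace s " " "") "." "") "-" ""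

-- first loop: for code in NFL_TEAM_ALIASES: if token == code.lower(): return code
def pvScanCodes (token : String) : List (String × List String) → Option String
  | [] => none
  | p :: rest => if token == PySem.Str.lower p.1 then some p.1 else pvScanCodes token rest

-- second loop: for code, aliases in items(): for alias in aliases: if token == alias_token: return code
def pvScanAliases (token : String) : List (String × List String) → Option String
  | [] => none
  | p :: rest =>
    if p.2.any (fun al => token == pvNormAlias al) then some p.1 else pvScanAliases token rest

def canonical_team_py (code_or_name : String) (league : String) : Option String :=
  -- the isinstance(code_or_name, str) guard is always true under the type convention
  let token := pvNormalize code_or_name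
  match pvScanCodes token pvNflTable with
  | some code => some code
  | none => pvScanAliases token pvNflTable

-- ===== PORT B =====
-- _NFL_LOOKUP: the precomputed flat dict literal from Source B
def pvNflLookup : PySem.Dict String String := PySem.Dict.mk [("ari", "ARI"), ("atl", "ATL"), ("bal", "BAL"), ("buf", "BUF"), ("car", "CAR"), ("chi", "CHI"), ("cin", "CIN"), ("cle", "CLE"), ("dal", "DAL"), ("den", "DEN"), ("det", "DET"), ("gb", "GB"), ("hou", "HOU"), ("ind", "IND"), ("jax", "JAX"), ("kc", "KC"), ("lac", "LAC"), ("lar", "LAR"), ("la", "LA"), ("lv", "LV"), ("mia", "MIA"), ("min", "MIN"), ("ne", "NE"), ("no", "NO"), ("nyg", "NYG"), ("nyj", "NYJ"), ("phi", "PHI"), ("pit", "PIT"), ("sea", "SEA"), ("sf", "SF"), ("tb", "TB"), ("ten", "TEN"), ("was", "WAS"), ("arizonacardinals", "ARI"), ("atlantafalcons", "ATL"), ("baltimoreravens", "BAL"), ("buffalobills", "BUF"), ("carolinapanthers", "CAR"), ("chicagobears", "CHI"), ("cincinnatibengals", "CIN"), ("clevelandbrowns", "CLE"), ("dallascowboys",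 "DAL"), ("denverbroncos", "DEN"), ("detroitlions", "DET"), ("greenbaypackers", "GB"), ("greenbay", "GB"), ("houstontexans", "HOU"), ("indianapoliscolts", "IND"), ("jacksonvillejaguars", "JAX"), ("kansascitychiefs", "KC"), ("kansascity", "KC"), ("losangeleschargers", "LAC"), ("lachargers", "LAC"), ("losangelesrams", "LAR"), ("larams", "LAR"), ("lasvegasraiders", "LV"), ("oaklandraiders", "LV"), ("raiders", "LV"), ("miamidolphins", "MIA"), ("minnesotavikings", "MIN"), ("newenglandpatriots", "NE"), ("newengland", "NE"), ("neworleanssaints", "NO"), ("newyorkgiants", "NYG"), ("nygiants", "NYG"), ("newyorkjets", "NYJ"), ("nyjets", "NYJ"), ("philadelphiaeagles", "PHI"), ("pittsburghsteelers", "PIT"), ("seattleseahawks", "SEA"), ("sanfrancisco49ers", "SF"), ("sanfrancisco", "SF"), ("tampabaybuccaneers", "TB"), ("tampabay", "TB"), ("buccaneers", "TB"), ("tennesseetitans", "TEN"), ("washingtoncommanders", "WAS"), ("washington", "WAS")]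

def canonical_team_py_alt (code_or_name : String) (league : String) : Option String :=
  pvNflLookup.get? (pvNormalize code_or_name)


-- ===== PRECONDITION & SPEC =====
def Spec_canonical_team_py (code_or_name : String) (league : String) (out : Option String) : Prop := out = canonical_team_py_alt code_or_name league
instance (code_or_name : String) (league : String) (out : Option String) : Decidable (Spec_canonical_team_py code_or_name league out) := by unfold Spec_canonical_team_py; infer_instance

-- ===== CLAIM (what is proved, stated in full; the proofs are below) =====
def Claim_equal_canonical_team_py : Prop := ∀ (code_or_name : String) (league : String), Dom_canonical_team_py code_or_name league → Spec_canonical_team_py code_or_name league (canonical_team_py code_or_name league)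

-- ===== LEMMAS AND PROOFS =====
def pvCodePairs : List (String × String) := [("ari", "ARI"), ("atl", "ATL"), ("bal", "BAL"), ("buf", "BUF"), ("car", "CAR"), ("chi", "CHI"), ("cin", "CIN"), ("cle", "CLE"), ("dal", "DAL"), ("den", "DEN"), ("det", "DET"), ("gb", "GB"), ("hou", "HOU"), ("ind", "IND"), ("jax", "JAX"), ("kc", "KC"), ("lac", "LAC"), ("lar", "LAR"), ("la", "LA"), ("lv", "LV"), ("mia", "MIA"), ("min", "MIN"), ("ne", "NE"), ("no", "NO"), ("nyg", "NYG"), ("nyj", "NYJ"), ("phi", "PHI"), ("pit", "PIT"), ("sea", "SEA"), ("sf", "SF"), ("tb", "TB"), ("ten", "TEN"), ("was", "WAS")]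

def pvAliasPairs : List (String × String) := [("arizonacardinals", "ARI"), ("atlantafalcons", "ATL"), ("baltimoreravens", "BAL"), ("buffalobills", "BUF"), ("carolinapanthers", "CAR"), ("chicagobears", "CHI"), ("cincinnatibengals", "CIN"), ("clevelandbrowns", "CLE"), ("dallascowboys", "DAL"), ("denverbroncos", "DEN"), ("detroitlions", "DET"), ("greenbaypackers", "GB"), ("greenbay", "GB"), ("houstontexans", "HOU"), ("indianapoliscolts", "IND"), ("jacksonvillejaguars", "JAX"), ("kansascitychiefs", "KC"), ("kansascity", "KC"), ("losangeleschargers", "LAC"), ("lachargers", "LAC"), ("losangelesrams", "LAR"), ("larams", "LAR"), ("losangelesrams", "LA"), ("losangeleschargers", "LA"), ("larams", "LA"), ("lachargers", "LA"), ("lasvegasraiders", "LV"), ("oaklandraiders", "LV"), ("raiders", "LV"), ("miamidolphins", "MIA"), ("minnesotavikings", "MIN"), ("newenglandpatriots", "NE"), ("newengland", "NE"), ("neworleanssaints", "NO"), ("newyorkgiants", "NYG"), ("nygiants", "NYG"), ("newyorkjets", "NYJ"), ("nyjets", "NYJ"), ("philadelphiaeagles", "PHI"), ("pittsburghsteelers",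 "PIT"), ("seattleseahawks", "SEA"), ("sanfrancisco49ers", "SF"), ("sanfrancisco", "SF"), ("tampabaybuccaneers", "TB"), ("tampabay", "TB"), ("buccaneers", "TB"), ("tennesseetitans", "TEN"), ("washingtoncommanders", "WAS"), ("washington", "WAS")]

-- simple first-match association lookup: the common normal form of both sides
def pvAssoc (t : String) : List (String × String) → Option String
  | [] => none
  | (k, v) :: rest => if t == k then some v else pvAssoc t rest

-- first-occurrence key dedup with an accumulator of already-emitted keys (structural, decide-reducible)
def pvDedup (seen : List String) : List (String × String) → List (String × String)
  | [] => []
  | (k, v) :: rest =>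
    if seen.contains k then pvDedup seen rest else (k, v) :: pvDedup (k :: seen) rest

-- A's code scan is an assoc lookup over the (lowered code, code) pairs
theorem pvScanCodes_eq (t : String) (l : List (String × List String)) :
    pvScanCodes t l = pvAssoc t (l.map (fun p => (PySem.Str.lower p.1, p.1))) := by
  induction l with
  | nil => rfl
  | cons p rest ih => simp [pvScanCodes, pvAssoc, ih]

-- A's alias scan is an assoc lookup over the flattened (normalized alias, code) pairs
theorem pvScanAliases_eq (t : String) (l : List (String × List String)) :
    pvScanAliases t l = pvAssoc t (l.flatMap (fun p => p.2.map (fun al => (pvNormAlias al, p.1)))) := by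
  induction l with
  | nil => rfl
  | cons p rest ih =>
    simp only [pvScanAliases, List.flatMap_cons, ih]
    induction p.2 with
    | nil => simp
    | cons al als ih2 =>
      by_cases h : t == pvNormAlias al
      · simp [pvAssoc, h]
      · simp only [List.any_cons, List.map_cons, List.cons_append, pvAssoc, h] at ih2 ⊢
        simpa using ih2

theorem pvAssoc_append (t : String) (l1 l2 : List (String × String)) :
    pvAssoc t (l1 ++ l2) = match pvAssoc t l1 with
      | some v => some v
      | none => pvAssoc t l2 := by
  induction l1 with
  | nil => rfl
  | cons p rest ih =>
    obtain ⟨k, v⟩ := p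
    by_cases h : t == k <;> simp [pvAssoc, h, ih]

-- dict lookup in a literal dict is the same assoc lookup
theorem pvGet?_mk_eq_assoc (t : String) (l : List (String × String)) :
    (PySem.Dict.mk l).get? t = pvAssoc t l := by
  induction l with
  | nil => rfl
  | cons p rest ih =>
    obtain ⟨k, v⟩ := p
    rw [PySem.Dict.get?_mk_cons, pvAssoc, ih, Bool.beq_comm]

-- dropping a later duplicate key never changes a first-match lookup
theorem pvAssoc_dedup (t : String) (l : List (String × String)) (seen : List String)
    (ht : ¬ t ∈ seen) : pvAssoc t (pvDedup seen l) = pvAssoc t l := by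
  induction l generalizing seen with
  | nil => rfl
  | cons p rest ih =>
    obtain ⟨k, v⟩ := p
    by_cases hk : k ∈ seen
    · have hne : (t == k) = false := by
        rw [beq_eq_false_iff_ne]
        intro h; subst h; exact ht hk
      simp [pvDedup, hk, pvAssoc, hne, ih seen ht]
    · by_cases htk : (t == k) = true
      · simp [pvDedup, hk, pvAssoc, htk]
      · have : ¬ t ∈ (k :: seen) := by
          simp only [List.mem_cons, not_or]
          exact ⟨by simpa using (beq_eq_false_iff_ne (a := t) (b := k)).mp (by simpa using htk), ht⟩
        simp [pvDedup, hk, pvAssoc, htk, ih (k :: seen) this]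

set_option maxRecDepth 100000 in
theorem pvCodePairs_eq : pvNflTable.map (fun p => (PySem.Str.lower p.1, p.1)) = pvCodePairs := by decide

set_option maxRecDepth 100000 in
theorem pvAliasPairs_eq :
    pvNflTable.flatMap (fun p => p.2.map (fun al => (pvNormAlias al, p.1))) = pvAliasPairs := by decide

-- B's literal table is exactly the first-occurrence dedup of codes-then-aliases
set_option maxRecDepth 100000 in
theorem pvNflLookup_eq_dedup : pvNflLookup = PySem.Dict.mk (pvDedup [] (pvCodePairs ++ pvAliasPairs)) := by decide

theorem pvCore_eq (t : String) :
    (match pvScanCodes t pvNflTable with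
     | some code => some code
     | none => pvScanAliases t pvNflTable) = pvNflLookup.get? t := by
  rw [pvScanCodes_eq, pvScanAliases_eq, pvNflLookup_eq_dedup, pvGet?_mk_eq_assoc,
      pvCodePairs_eq, pvAliasPairs_eq, pvAssoc_dedup t _ [] (by simp), ← pvAssoc_append]

-- ===== VERDICT (by name: the statement is the Claim_ definition above) =====
theorem canonical_team_py_spec : Claim_equal_canonical_team_py := by
  intro code_or_name league _
  unfold Spec_canonical_team_py canonical_team_py canonical_team_py_alt
  exact pvCore_eq (pvNormalize code_or_name)
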